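-- pv_equiv track=rewrite | github.com/ralphvirtucio/coding-challenges | string-scramble/main.py | string_scramble
-- ===== SOURCE A (Python) =====
-- def string_scramble(str1, str2):
--
--   hash_1 = {}
--   hash_2 = {}
--
--   for char in str1:
--     hash_1[char] = hash_1.get(char, 0) + 1
--
--   for char in str2:
--     hash_2[char] = hash_2.get(char, 0) + 1
--
--
--   for key in hash_2:
--     if key not in hash_1 or hash_1[key] < hash_2[key]:
--       return "false"
--
--
--   return "true"
-- ===== SOURCE B (Python) =====
-- def string_scramble(str1, str2):
--   counts = {}
--   for ch in str1:
--     counts[ch] = counts.get(ch, 0) + 1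
--   for ch in str2:
--     n = counts.get(ch, 0)
--     if n <= 0:
--       return "false"
--     counts[ch] = n - 1
--   return "true"
-- ===== Notes on version B (the rewrite author's own statement) =====
-- stated objective: simpler
-- what changed: B keeps a single frequency table built from str1 and consumes it in one pass over str2, returning "false" as soon as a character's remaining count is exhausted, instead of building a second table for str2 and then comparing the two tables key by key.
import Mathlib
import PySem

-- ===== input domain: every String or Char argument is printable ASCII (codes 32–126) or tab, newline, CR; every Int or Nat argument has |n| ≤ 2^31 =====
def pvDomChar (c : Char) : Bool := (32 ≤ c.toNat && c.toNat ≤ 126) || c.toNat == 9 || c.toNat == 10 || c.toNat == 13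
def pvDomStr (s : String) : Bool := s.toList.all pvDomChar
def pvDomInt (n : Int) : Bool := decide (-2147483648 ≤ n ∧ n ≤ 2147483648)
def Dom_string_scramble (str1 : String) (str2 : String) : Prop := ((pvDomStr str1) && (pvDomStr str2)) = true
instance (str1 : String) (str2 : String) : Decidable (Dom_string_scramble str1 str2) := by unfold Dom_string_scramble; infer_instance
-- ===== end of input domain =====

-- B keeps one frequency table built from str1 and consumes it in a single pass over str2
-- with early exit, instead of building a second table and comparing the two tables (objective: simpler).


-- ===== PORT A =====
-- the third loop of A: for key in hash_2: if key not in hash_1 or hash_1[key] < hash_2[key]: return "false"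
def pvLoopA (hash1 hash2 : PySem.Dict Char Int) : List Char → String
  | [] => "true"
  | k :: ks =>
      if (!hash1.contains k) || decide (hash1.getD k 0 < hash2.getD k 0) then "false"
      else pvLoopA hash1 hash2 ks

def string_scramble (str1 : String) (str2 : String) : String :=
  let hash1 := str1.toList.foldl (fun d c => d.insert c (d.getD c 0 + 1)) PySem.Dict.empty
  let hash2 := str2.toList.foldl (fun d c => d.insert c (d.getD c 0 + 1)) PySem.Dict.empty
  pvLoopA hash1 hash2 hash2.keys

-- ===== PORT B =====
-- the second loop of B: consume the counts table along str2, early "false" on exhaustion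
def pvConsume (counts : PySem.Dict Char Int) : List Char → String
  | [] => "true"
  | c :: rest =>
      let n := counts.getD c 0
      if n ≤ 0 then "false" else pvConsume (counts.insert c (n - 1)) rest

def string_scramble_alt (str1 : String) (str2 : String) : String :=
  let counts := str1.toList.foldl (fun d c => d.insert c (d.getD c 0 + 1)) PySem.Dict.empty
  pvConsume counts str2.toList

-- ===== PRECONDITION & SPEC =====
def Spec_string_scramble (str1 : String) (str2 : String) (out : String) : Prop := out = string_scramble_alt str1 str2
instance (str1 : String) (str2 : String) (out : String) : Decidable (Spec_string_scramble str1 str2 out) := by unfold Spec_string_scramble; infer_instance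

-- ===== CLAIM (what is proved, stated in full; the proofs are below) =====
def Claim_equal_string_scramble : Prop := ∀ (str1 : String) (str2 : String), Dom_string_scramble str1 str2 → Spec_string_scramble str1 str2 (string_scramble str1 str2)

-- ===== LEMMAS AND PROOFS =====

-- B's consume loop returns "true" iff every character demand in l is covered by d's counts
theorem pvConsume_eq (l : List Char) (d : PySem.Dict Char Int) :
    pvConsume d l = if ∀ c ∈ l, (l.count c : Int) ≤ d.getD c 0 then "true" else "false" := by
  induction l generalizing d with
  | nil => simp [pvConsume]
  | cons c rest ih =>
    simp only [pvConsume]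
    by_cases hn : d.getD c 0 ≤ 0
    · rw [if_pos hn, if_neg]
      intro h
      have := h c (List.mem_cons_self ..)
      rw [List.count_cons_self] at this
      have : (0:Int) ≤ rest.count c := Int.natCast_nonneg _
      omega
    · rw [if_neg hn, ih]
      congr 1
      simp only [eq_iff_iff]
      constructor
      · intro h b hb
        rw [List.mem_cons] at hb
        by_cases hbc : b = c
        · subst hbc
          rw [List.count_cons_self]
          have hc : (rest.count b : Int) ≤ d.getD b 0 - 1 := by
            by_cases hbr : b ∈ rest
            · have := h b hbr
              rwa [PySem.Dict.getD_insert_self] at this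
            · rw [List.count_eq_zero_of_not_mem hbr]
              push_cast
              omega
          push_cast
          omega
        · rw [List.count_cons_of_ne (fun he => hbc he.symm)]
          have hbr : b ∈ rest := by
            rcases hb with hb | hb
            · exact absurd hb hbc
            · exact hb
          have := h b hbr
          rwa [PySem.Dict.getD_insert_of_ne _ _ _ hbc] at this
      · intro h b hb
        by_cases hbc : b = c
        · subst hbc
          have := h b (List.mem_cons_self ..)
          rw [List.count_cons_self] at this
          rw [PySem.Dict.getD_insert_self]
          push_cast at this
          omega
        · have := h b (List.mem_cons_of_mem _ hb)
          rw [List.count_cons_of_ne (fun he => hbc he.symm)] at this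
          rwa [PySem.Dict.getD_insert_of_ne _ _ _ hbc]

-- A's key loop over a list of keys all drawn from l2
theorem pvLoopA_eq (l1 l2 : List Char) (ks : List Char) (hks : ∀ k ∈ ks, k ∈ l2) :
    pvLoopA (PySem.Dict.counter l1) (PySem.Dict.counter l2) ks =
      if ∀ k ∈ ks, (l2.count k : Int) ≤ l1.count k then "true" else "false" := by
  induction ks with
  | nil => simp [pvLoopA]
  | cons k ks ih =>
    have hkl2 : k ∈ l2 := hks k (List.mem_cons_self ..)
    simp only [pvLoopA]
    by_cases hbad : ((!(PySem.Dict.counter l1).contains k) ||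
        decide ((PySem.Dict.counter l1).getD k 0 < (PySem.Dict.counter l2).getD k 0)) = true
    · rw [if_pos hbad, if_neg]
      intro h
      have hk := h k (List.mem_cons_self ..)
      simp only [PySem.Dict.contains_counter, PySem.Dict.getD_counter, Bool.or_eq_true,
        Bool.not_eq_eq_eq_not, Bool.not_true, decide_eq_true_eq] at hbad
      rcases hbad with hnot | hlt
      · have hm : k ∉ l1 := by simpa using hnot
        have h1 : l1.count k = 0 := List.count_eq_zero_of_not_mem hm
        have h2 : 0 < l2.count k := List.count_pos_iff.mpr hkl2
        omega
      · omega
    · rw [if_neg hbad, ih (fun j hj => hks j (List.mem_cons_of_mem _ hj))]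
      congr 1
      simp only [eq_iff_iff]
      simp only [PySem.Dict.contains_counter, PySem.Dict.getD_counter, Bool.or_eq_true,
        Bool.not_eq_eq_eq_not, Bool.not_true, decide_eq_true_eq, not_or, not_lt] at hbad
      constructor
      · intro h b hb
        rw [List.mem_cons] at hb
        rcases hb with hb | hb
        · subst hb
          exact hbad.2
        · exact h b hb
      · intro h b hb
        exact h b (List.mem_cons_of_mem _ hb)

theorem counter_foldl (l : List Char) :
    l.foldl (fun d c => d.insert c (d.getD c 0 + 1)) PySem.Dict.empty = PySem.Dict.counter l :=
  PySem.Dict.foldl_insert_getD_add_one_eq_counter l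

-- ===== VERDICT (by name: the statement is the Claim_ definition above) =====
theorem string_scramble_spec : Claim_equal_string_scramble := by
  intro str1 str2 _
  unfold Spec_string_scramble string_scramble string_scramble_alt
  simp only [counter_foldl]
  rw [PySem.Dict.keys_counter]
  rw [pvLoopA_eq str1.toList str2.toList _
    (fun k hk => (PySem.Set.mem_ofList str2.toList k).1 hk)]
  rw [pvConsume_eq]
  simp only [PySem.Dict.getD_counter]
  congr 1
  simp only [eq_iff_iff]
  constructor
  · intro h c hc
    exact h c ((PySem.Set.mem_ofList str2.toList c).2 hc)
  · intro h k hk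
    exact h k ((PySem.Set.mem_ofList str2.toList k).1 hk)
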